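-- pv_equiv track=rewrite | github.com/chenchuraviteja/test_repository | new/new.py | format_java_opts
-- ===== SOURCE A (Python) =====
-- def format_java_opts(java_opts_str: str) -> str:
--     """Formats JAVA_OPTS with proper line breaks.
--
--     Args:
--         java_opts_str: JAVA_OPTS string to format
--
--     Returns:
--         Formatted JAVA_OPTS string
--     """
--     opts = []
--     current = []
--     for part in java_opts_str.split():
--         if part.startswith('-'):
--             if current:
--                 opts.append(' '.join(current))
--                 current = []
--             current.append(part)
--         else:
--             current.append(part)
--     if current:
--         opts.append(' '.join(current))
--     return '\n'.join(opts)
-- ===== SOURCE B (Python) =====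
-- def format_java_opts(java_opts_str: str) -> str:
--     """Formats JAVA_OPTS with proper line breaks."""
--     toks = java_opts_str.split()
--     tail = [p for t in toks[1:]
--               for p in (('\n' if t.startswith('-') else ' '), t)]
--     return ''.join(toks[:1] + tail)
-- ===== Notes on version B (the rewrite author's own statement) =====
-- stated objective: simpler
-- what changed: A accumulates tokens into a current-group list, flushes the groups into a second list and joins twice; B drops the grouping state entirely and emits, in one comprehension, each non-first token prefixed by a newline (dash token) or a space, joining once.
import Mathlib
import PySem

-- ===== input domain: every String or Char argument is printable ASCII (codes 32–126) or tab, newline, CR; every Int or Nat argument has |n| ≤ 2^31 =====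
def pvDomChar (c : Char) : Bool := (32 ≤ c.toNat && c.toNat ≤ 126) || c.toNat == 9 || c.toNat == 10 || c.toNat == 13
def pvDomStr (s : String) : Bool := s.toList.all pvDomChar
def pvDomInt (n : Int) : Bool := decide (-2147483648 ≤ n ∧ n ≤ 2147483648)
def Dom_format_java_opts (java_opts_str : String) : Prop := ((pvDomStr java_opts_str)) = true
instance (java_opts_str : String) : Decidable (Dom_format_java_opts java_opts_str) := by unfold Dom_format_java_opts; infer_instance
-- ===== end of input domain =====

-- B replaces A's two-list grouping and double join with a single comprehension that
-- prefixes each non-first token with '\n' (dash token) or ' ' and joins once (objective: simpler).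

-- ===== PORT A =====
-- loop body of A: state = (opts, current), one token processed
def formatJavaOptsStep (st : List String × List String) (part : String) :
    List String × List String :=
  if PySem.Str.startswith part "-" then
    if st.2 ≠ [] then (st.1 ++ [PySem.Str.join " " st.2], ([] : List String) ++ [part])
    else (st.1, st.2 ++ [part])
  else (st.1, st.2 ++ [part])

def format_java_opts (java_opts_str : String) : String :=
  let st := (PySem.Str.split₀ java_opts_str).foldl formatJavaOptsStep ([], [])
  -- if current: opts.append(' '.join(current))
  let opts := if st.2 ≠ [] then st.1 ++ [PySem.Str.join " " st.2] else st.1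
  PySem.Str.join "\n" opts

-- ===== PORT B =====
def format_java_opts_alt (java_opts_str : String) : String :=
  let toks := PySem.Str.split₀ java_opts_str
  -- tail = [p for t in toks[1:] for p in (('\n' if t.startswith('-') else ' '), t)]
  let tail := (toks.drop 1).flatMap
      (fun t => [(if PySem.Str.startswith t "-" then "\n" else " "), t])
  PySem.Str.join "" (toks.take 1 ++ tail)

-- ===== PRECONDITION & SPEC =====
def Spec_format_java_opts (java_opts_str : String) (out : String) : Prop := out = format_java_opts_alt java_opts_str
instance (java_opts_str : String) (out : String) : Decidable (Spec_format_java_opts java_opts_str out) := by unfold Spec_format_java_opts; infer_instance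

-- ===== CLAIM (what is proved, stated in full; the proofs are below) =====
def Claim_equal_format_java_opts : Prop := ∀ (java_opts_str : String), Dom_format_java_opts java_opts_str → Spec_format_java_opts java_opts_str (format_java_opts java_opts_str)

-- ===== LEMMAS AND PROOFS =====

-- Char-list mirror of A's loop step and of its final rendering
def pvStepC (st : List (List Char) × List (List Char)) (part : List Char) :
    List (List Char) × List (List Char) :=
  if PySem.Chars.startswith part ['-'] then
    if st.2 ≠ [] then (st.1 ++ [PySem.Chars.join [' '] st.2], ([] : List (List Char)) ++ [part])
    else (st.1, st.2 ++ [part])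
  else (st.1, st.2 ++ [part])

def pvRenderC (st : List (List Char) × List (List Char)) : List Char :=
  PySem.Chars.join ['\n']
    (if st.2 ≠ [] then st.1 ++ [PySem.Chars.join [' '] st.2] else st.1)

def pvSep (t : List Char) : List Char :=
  if PySem.Chars.startswith t ['-'] then ['\n'] else [' ']

def pvFlat (ts : List (List Char)) : List Char := ts.flatMap (fun t => pvSep t ++ t)

lemma pv_join_append (sep : List Char) (xs : List (List Char)) (x : List Char) :
    PySem.Chars.join sep (xs ++ [x])
      = (if xs = [] then [] else PySem.Chars.join sep xs ++ sep) ++ x := by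
  induction xs with
  | nil => simp [PySem.Chars.join_singleton]
  | cons a xs ih =>
    cases xs with
    | nil => simp [PySem.Chars.join_cons_cons, PySem.Chars.join_singleton]
    | cons b xs' =>
      have h1 : PySem.Chars.join sep ((a :: b :: xs') ++ [x])
          = a ++ sep ++ PySem.Chars.join sep ((b :: xs') ++ [x]) := by
        simpa using PySem.Chars.join_cons_cons sep a b (xs' ++ [x])
      rw [h1, ih]
      simp [PySem.Chars.join_cons_cons]

lemma pv_join_nil_sep (l : List (List Char)) : PySem.Chars.join [] l = l.flatten := by
  induction l with
  | nil => simp [PySem.Chars.join_nil]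
  | cons a l ih =>
    cases l with
    | nil => simp [PySem.Chars.join_singleton]
    | cons b l' => rw [PySem.Chars.join_cons_cons]; simp [ih]

-- B's one-pass piece list, flattened, is the separator-prefixed concatenation
lemma pv_flat_pairs (ts : List (List Char)) :
    (ts.flatMap (fun t => [pvSep t, t])).flatten = pvFlat ts := by
  induction ts with
  | nil => simp [pvFlat]
  | cons a ts ih => simp [pvFlat, pvSep] at *; simp [ih]

-- A's loop invariant: once current is nonempty, every further token just appends
-- its separator and itself to the rendered output.
lemma pv_main (ts : List (List Char)) :
    ∀ opts cur, cur ≠ [] →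
      pvRenderC (ts.foldl pvStepC (opts, cur)) = pvRenderC (opts, cur) ++ pvFlat ts := by
  induction ts with
  | nil => intro opts cur _; simp [pvFlat]
  | cons t ts ih =>
    intro opts cur hcur
    by_cases hd : PySem.Chars.startswith t ['-']
    · have hstep : pvStepC (opts, cur) t
          = (opts ++ [PySem.Chars.join [' '] cur], [t]) := by
        simp [pvStepC, hd, hcur]
      rw [List.foldl_cons, hstep, ih _ _ (by simp)]
      have hr : pvRenderC (opts ++ [PySem.Chars.join [' '] cur], [t])
          = pvRenderC (opts, cur) ++ ['\n'] ++ t := by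
        simp only [pvRenderC, hcur, if_pos (by simp : ([t] : List (List Char)) ≠ []),
          ne_eq, not_false_eq_true, if_pos, PySem.Chars.join_singleton]
        have h1 : opts ++ [PySem.Chars.join [' '] cur] ++ [t]
            = (opts ++ [PySem.Chars.join [' '] cur]) ++ [t] := by simp
        rw [h1, pv_join_append, if_neg (by simp)]
      rw [hr]
      simp [pvFlat, pvSep, hd]
    · have hstep : pvStepC (opts, cur) t = (opts, cur ++ [t]) := by
        simp [pvStepC, hd]
      rw [List.foldl_cons, hstep, ih _ _ (by simp [hcur])]
      have hr : pvRenderC (opts, cur ++ [t]) = pvRenderC (opts, cur) ++ [' '] ++ t := by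
        simp only [pvRenderC, hcur, if_pos (by simp [hcur] : cur ++ [t] ≠ []),
          ne_eq, not_false_eq_true, if_pos]
        rw [pv_join_append [' '] cur t, if_neg hcur]
        rw [pv_join_append ['\n'] opts, pv_join_append ['\n'] opts]
        simp
      rw [hr]
      simp [pvFlat, pvSep, hd]

-- B's piece list moves to char-lists tokenwise
lemma pv_pieces_bridge (l : List String) :
    (l.flatMap (fun t => [(if PySem.Str.startswith t "-" then "\n" else " "), t])).map String.toList
      = (l.map String.toList).flatMap (fun t => [pvSep t, t]) := by
  induction l with
  | nil => simp
  | cons t l ih =>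
    have hsw : PySem.Str.startswith t "-" = PySem.Chars.startswith t.toList ['-'] := by
      simpa using PySem.Str.startswith_eq t "-"
    have hh : (if PySem.Str.startswith t "-" then ("\n" : String) else " ").toList
        = pvSep t.toList := by
      unfold pvSep
      by_cases hd : PySem.Chars.startswith t.toList ['-'] <;> simp [hd]
    simp only [List.flatMap_cons, List.map_append, List.map_cons, List.map_nil, hh, ih]

-- the String-level fold of A mirrors pvStepC under toList
lemma pv_fold_bridge (ts : List String) :
    ∀ (opts cur : List String),
      (((ts.foldl formatJavaOptsStep (opts, cur)).1.map String.toList,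
        (ts.foldl formatJavaOptsStep (opts, cur)).2.map String.toList)
        : List (List Char) × List (List Char))
      = (ts.map String.toList).foldl pvStepC (opts.map String.toList, cur.map String.toList) := by
  induction ts with
  | nil => intro opts cur; simp
  | cons t ts ih =>
    intro opts cur
    simp only [List.foldl_cons, List.map_cons]
    have hsw : PySem.Str.startswith t "-" = PySem.Chars.startswith t.toList ['-'] := by
      simpa using PySem.Str.startswith_eq t "-"
    by_cases hd : PySem.Chars.startswith t.toList ['-']
    · by_cases hc : cur = []
      · subst hc
        have := ih opts [t]
        simpa [formatJavaOptsStep, pvStepC, hsw, hd] using this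
      · have := ih (opts ++ [PySem.Str.join " " cur]) [t]
        have hmc : cur.map String.toList ≠ [] := by simpa using hc
        simpa [formatJavaOptsStep, pvStepC, hsw, hd, hc, hmc, PySem.Str.toList_join] using this
    · have := ih opts (cur ++ [t])
      simpa [formatJavaOptsStep, pvStepC, hsw, hd] using this

-- ===== VERDICT (by name: the statement is the Claim_ definition above) =====
set_option maxHeartbeats 1000000 in
theorem format_java_opts_spec : Claim_equal_format_java_opts := by
  intro s _
  unfold Spec_format_java_opts
  apply String.toList_inj.mp
  simp only [format_java_opts, format_java_opts_alt]
  have hmap : (PySem.Str.split₀ s).map String.toList = PySem.Chars.split₀ s.toList :=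
    PySem.Str.split₀_map_toList s
  -- A's side down to char lists
  have hb := pv_fold_bridge (PySem.Str.split₀ s) [] []
  simp only [List.map_nil] at hb
  rw [hmap] at hb
  set stS := (PySem.Str.split₀ s).foldl formatJavaOptsStep ([], []) with hstS
  set stC := (PySem.Chars.split₀ s.toList).foldl pvStepC ([], []) with hstC
  have h1 : stS.1.map String.toList = stC.1 := congrArg Prod.fst hb
  have h2 : stS.2.map String.toList = stC.2 := congrArg Prod.snd hb
  have hA : (PySem.Str.join "\n"
      (if stS.2 ≠ [] then stS.1 ++ [PySem.Str.join " " stS.2] else stS.1)).toList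
      = pvRenderC stC := by
    by_cases hc : stS.2 = []
    · have hc' : stC.2 = [] := by rw [← h2, hc]; simp
      simp [pvRenderC, hc, hc', PySem.Str.toList_join, h1]
    · have hc' : stC.2 ≠ [] := by rw [← h2]; simpa using hc
      simp [pvRenderC, hc, hc', PySem.Str.toList_join, h1, h2]
  rw [hA]
  -- B's side down to char lists
  have hB : (PySem.Str.join ""
      ((PySem.Str.split₀ s).take 1 ++ ((PySem.Str.split₀ s).drop 1).flatMap
        (fun t => [(if PySem.Str.startswith t "-" then "\n" else " "), t]))).toList
      = (((PySem.Chars.split₀ s.toList).take 1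
          ++ ((PySem.Chars.split₀ s.toList).drop 1).flatMap (fun t => [pvSep t, t]))).flatten := by
    rw [PySem.Str.toList_join, ← pv_join_nil_sep]
    congr 1
    rw [List.map_append, List.map_take, hmap, pv_pieces_bridge, List.map_drop, hmap]
  rw [hB]
  -- finish: both sides are head-token ++ separator-prefixed tail
  rw [hstC]
  cases hsp : PySem.Chars.split₀ s.toList with
  | nil => simp [pvRenderC]
  | cons t rest =>
    have hstep0 : pvStepC ([], []) t = ([], [t]) := by
      by_cases hd : PySem.Chars.startswith t ['-'] <;> simp [pvStepC, hd]
    rw [List.foldl_cons, hstep0, pv_main rest [] [t] (by simp)]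
    simp [pvRenderC, PySem.Chars.join_singleton, pv_flat_pairs]
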